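-- pv_equiv track=rewrite | github.com/unique-khatiwala/DNA-toolkit | DNA_toolkit.py | proteinLookup
-- ===== SOURCE A (Python) =====
-- def proteinLookup(frame):
--     pt,flag = [],False
--     for bp in frame:
--         if (flag == True) and (bp == '_'):
--             return "".join(pt)
--         if (bp == 'M') or (flag == True):
--             flag = True
--             pt.append(bp)
--     return "".join(pt) if pt!=[] else ''
-- ===== SOURCE B (Python) =====
-- def proteinLookup(frame):
--     i = frame.find('M')
--     if i == -1:
--         return ''
--     rest = frame[i:]
--     j = rest.find('_')
--     return rest if j == -1 else rest[:j]
-- ===== Notes on version B (the rewrite author's own statement) =====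
-- stated objective: faster
-- what changed: A's single stateful flag-loop with a per-character accumulator is replaced by two substring searches and slices: locate the first start codon, take the suffix, cut at the first stop marker.
import Mathlib
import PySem

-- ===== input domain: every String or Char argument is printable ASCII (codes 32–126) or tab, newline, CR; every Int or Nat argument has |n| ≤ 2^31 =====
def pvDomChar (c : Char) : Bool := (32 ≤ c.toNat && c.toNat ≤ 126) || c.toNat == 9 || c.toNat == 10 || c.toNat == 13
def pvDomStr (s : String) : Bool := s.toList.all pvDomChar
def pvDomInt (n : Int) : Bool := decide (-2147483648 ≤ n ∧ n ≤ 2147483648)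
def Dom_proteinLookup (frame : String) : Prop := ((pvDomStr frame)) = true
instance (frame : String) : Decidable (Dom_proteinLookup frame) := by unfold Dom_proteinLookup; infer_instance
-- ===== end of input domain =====

-- Idiomatic rewrite: A's flag-loop becomes find('M') + slice + find('_') + slice; return values proved equal on the whole domain.


-- ===== PORT A =====
-- the for-loop with early return, state = (pt, flag)
def pvLoopA : List Char → List Char → Bool → String
  | [], pt, _ => if pt ≠ [] then String.ofList pt else ""
  | bp :: rest, pt, flag =>
    if flag = true ∧ bp = '_' then String.ofList pt
    else if bp = 'M' ∨ flag = true then pvLoopA rest (pt ++ [bp]) true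
    else pvLoopA rest pt flag

def proteinLookup (frame : String) : String := pvLoopA frame.toList [] false

-- ===== PORT B =====
def proteinLookup_alt (frame : String) : String :=
  let i := PySem.Str.find frame "M"
  if i = -1 then ""
  else
    let rest := PySem.Str.slice frame (some i) none
    let j := PySem.Str.find rest "_"
    if j = -1 then rest else PySem.Str.slice rest none (some j)

-- ===== PRECONDITION & SPEC =====
def Spec_proteinLookup (frame : String) (out : String) : Prop := out = proteinLookup_alt frame
instance (frame : String) (out : String) : Decidable (Spec_proteinLookup frame out) := by unfold Spec_proteinLookup; infer_instance

-- ===== CLAIM (what is proved, stated in full; the proofs are below) =====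
def Claim_equal_proteinLookup : Prop := ∀ (frame : String), Dom_proteinLookup frame → Spec_proteinLookup frame (proteinLookup frame)

-- ===== LEMMAS AND PROOFS =====

theorem pvLoopA_true (l pt : List Char) :
    pvLoopA l pt true = String.ofList (pt ++ l.takeWhile (· ≠ '_')) := by
  induction l generalizing pt with
  | nil => by_cases h : pt = [] <;> simp [pvLoopA, h]
  | cons c rest ih =>
    by_cases hc : c = '_'
    · subst hc; simp [pvLoopA, List.takeWhile]
    · simp [pvLoopA, hc, List.takeWhile, ih]


theorem pvLoopA_false (l : List Char) :
    pvLoopA l [] false = String.ofList ((l.dropWhile (· ≠ 'M')).takeWhile (· ≠ '_')) := by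
  induction l with
  | nil => simp [pvLoopA]
  | cons c rest ih =>
    by_cases hc : c = 'M'
    · subst hc
      simp [pvLoopA, List.dropWhile, pvLoopA_true]
    · simp [pvLoopA, hc, List.dropWhile, ih]

-- find of a single-char needle = length of the takeWhile prefix, when present
theorem pv_drop_takeWhile_length (cs : List Char) (p : Char → Bool) :
    cs.drop (cs.takeWhile p).length = cs.dropWhile p := by
  induction cs with
  | nil => simp
  | cons a l ih => by_cases h : p a <;> simp [List.takeWhile, List.dropWhile, h, ih]

theorem pv_singleton_prefix (c : Char) (l : List Char) : [c] <+: l ↔ l.head? = some c := by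
  cases l with
  | nil => simp
  | cons a t =>
    constructor
    · rintro ⟨u, hu⟩
      simp at hu
      simp [hu.1]
    · intro h
      simp at h
      exact ⟨t, by simp [h]⟩

theorem pv_head?_dropWhile_ne (cs : List Char) (c : Char) (h : cs.dropWhile (· ≠ c) ≠ []) :
    (cs.dropWhile (· ≠ c)).head? = some c := by
  induction cs with
  | nil => simp at h
  | cons a l ih =>
    by_cases hc : a = c
    · simp [List.dropWhile, hc]
    · rw [List.dropWhile_cons_of_pos (by simp [hc])] at h ⊢
      exact ih h

theorem pv_find_singleton (cs : List Char) (c : Char) (h : c ∈ cs) :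
    PySem.Chars.find cs [c] = ((cs.takeWhile (· ≠ c)).length : Int) := by
  have hin : [c] <:+: cs := by
    obtain ⟨l1, l2, rfl⟩ := List.append_of_mem h
    exact ⟨l1, l2, by simp⟩
  have hpos : 0 ≤ PySem.Chars.find cs [c] := (PySem.Chars.find_nonneg_iff cs [c]).mpr hin
  obtain ⟨hpre, hmin⟩ := PySem.Chars.find_spec (s := cs) (sub := [c]) hpos
  set n := (PySem.Chars.find cs [c]).toNat with hn
  set m := (cs.takeWhile (· ≠ c)).length with hm
  have hdw : cs.dropWhile (· ≠ c) ≠ [] := by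
    simp [List.dropWhile_eq_nil_iff]
    exact h
  have hprem : [c] <+: cs.drop m := by
    rw [hm, pv_drop_takeWhile_length, pv_singleton_prefix]
    exact pv_head?_dropWhile_ne cs c hdw
  have hnm : n ≤ m := by
    by_contra hlt
    exact hmin m (by omega) hprem
  have hmn : m ≤ n := by
    by_contra hlt
    push Not at hlt
    have hc' : cs[n]? = some c := by
      rw [← List.head?_drop]
      exact (pv_singleton_prefix c _).mp hpre
    have hnlen : n < cs.length := lt_of_lt_of_le hlt (List.takeWhile_prefix _).length_le
    have hgetn : cs[n] = c := by
      have := hc'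
      rw [List.getElem?_eq_getElem hnlen] at this
      exact Option.some.inj this
    have htk : cs[n] ∈ cs.takeWhile (· ≠ c) := by
      have : (cs.takeWhile (· ≠ c))[n] = cs[n] := List.IsPrefix.getElem (List.takeWhile_prefix _) hlt
      rw [← this]
      exact List.getElem_mem hlt
    have := List.mem_takeWhile_imp htk
    simp [hgetn] at this
  have : n = m := le_antisymm hnm hmn
  omega

-- ===== VERDICT (by name: the statement is the Claim_ definition above) =====
theorem pv_take_takeWhile_length (l : List Char) (p : Char → Bool) :
    l.take (l.takeWhile p).length = l.takeWhile p :=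
  (List.prefix_iff_eq_take.mp (List.takeWhile_prefix _)).symm

theorem pv_toList_alt (frame : String) :
    (proteinLookup_alt frame).toList
      = ((frame.toList.dropWhile (· ≠ 'M')).takeWhile (· ≠ '_')) := by
  unfold proteinLookup_alt
  have hMl : "M".toList = ['M'] := rfl
  have hUl : "_".toList = ['_'] := rfl
  by_cases hM : 'M' ∈ frame.toList
  · -- 'M' occurs: find returns the takeWhile length
    have hfind : PySem.Str.find frame "M"
        = ((frame.toList.takeWhile (· ≠ 'M')).length : Int) := by
      rw [PySem.Str.find_eq, hMl, pv_find_singleton _ _ hM]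
    have hne : PySem.Str.find frame "M" ≠ -1 := by
      rw [hfind]; omega
    rw [if_neg hne]
    have hrest : (PySem.Str.slice frame (some (PySem.Str.find frame "M")) none).toList
        = frame.toList.dropWhile (· ≠ 'M') := by
      rw [hfind, PySem.Str.toList_slice, PySem.Chars.slice_eq_listSlice,
        PySem.List.slice_from_natCast, pv_drop_takeWhile_length]
    set rest := PySem.Str.slice frame (some (PySem.Str.find frame "M")) none with hrestdef
    by_cases hU : '_' ∈ rest.toList
    · have hfind2 : PySem.Str.find rest "_"
          = ((rest.toList.takeWhile (· ≠ '_')).length : Int) := by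
        rw [PySem.Str.find_eq, hUl, pv_find_singleton _ _ hU]
      have hne2 : PySem.Str.find rest "_" ≠ -1 := by rw [hfind2]; omega
      rw [if_neg hne2]
      rw [hfind2, PySem.Str.toList_slice, PySem.Chars.slice_eq_listSlice,
        PySem.List.slice_to_natCast, pv_take_takeWhile_length, hrest]
    · have hfind2 : PySem.Str.find rest "_" = -1 := by
        rw [PySem.Str.find_eq_neg_one_iff, hUl, List.singleton_infix_iff]
        exact hU
      rw [if_pos hfind2]
      rw [← hrest]
      rw [List.takeWhile_eq_self_iff.mpr]
      intro x hx
      simp only [decide_eq_true_eq]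
      rw [hrest] at hx
      exact fun hxe => hU (by rw [hrest]; exact hxe ▸ hx)
  · -- no 'M': find = -1, both sides empty
    have hfind : PySem.Str.find frame "M" = -1 := by
      rw [PySem.Str.find_eq_neg_one_iff, hMl, List.singleton_infix_iff]
      exact hM
    have hdw : frame.toList.dropWhile (· ≠ 'M') = [] := by
      rw [List.dropWhile_eq_nil_iff]
      intro x hx
      simp only [decide_eq_true_eq]
      exact fun hxe => hM (hxe ▸ hx)
    rw [if_pos hfind, hdw]
    simp

theorem proteinLookup_spec : Claim_equal_proteinLookup := by
  intro frame _
  unfold Spec_proteinLookup proteinLookup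
  rw [pvLoopA_false]
  apply String.toList_inj.mp
  rw [pv_toList_alt]
  simp
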